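-- pv_equiv track=rewrite | github.com/ianwcooley/Project-Euler | 32.py | nine_pandigital
-- ===== SOURCE A (Python) =====
-- def nine_pandigital(multiplicand, multiplier, product):
--     digits = []
--     for number in [multiplicand, multiplier, product]:
--         while number > 0:
--             digit = number % 10
--             if digit in digits or digit == 0:
--                 return False
--             digits.append(digit)
--             number //= 10
--     if len(digits) == 9:
--         return True
--     else:
--         return False
-- ===== SOURCE B (Python) =====
-- def _digits(n):
--     ds = []
--     while n > 0:
--         ds.append(n % 10)
--         n //= 10
--     return ds
--
-- def nine_pandigital(multiplicand, multiplier, product):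
--     ds = _digits(multiplicand) + _digits(multiplier) + _digits(product)
--     return sorted(ds) == [1, 2, 3, 4, 5, 6, 7, 8, 9]
-- ===== Notes on version B (the rewrite author's own statement) =====
-- stated objective: simpler
-- what changed: B extracts all digits unconditionally and replaces A's incremental seen-digit membership checks, zero-digit early returns and final length test by a single sort-and-compare against [1..9].
import Mathlib
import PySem

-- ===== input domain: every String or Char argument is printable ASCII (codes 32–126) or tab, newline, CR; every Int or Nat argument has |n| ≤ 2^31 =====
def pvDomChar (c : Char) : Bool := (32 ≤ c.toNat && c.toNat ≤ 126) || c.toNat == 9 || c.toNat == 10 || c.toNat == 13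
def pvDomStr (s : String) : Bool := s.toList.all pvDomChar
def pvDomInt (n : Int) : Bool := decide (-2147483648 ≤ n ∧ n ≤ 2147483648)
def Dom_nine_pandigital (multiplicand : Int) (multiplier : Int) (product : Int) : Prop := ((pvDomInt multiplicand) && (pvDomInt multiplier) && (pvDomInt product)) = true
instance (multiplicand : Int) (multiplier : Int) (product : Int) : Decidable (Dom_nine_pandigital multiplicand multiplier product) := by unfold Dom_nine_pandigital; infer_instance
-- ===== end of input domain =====

-- B replaces A's incremental seen-digit membership checks, zero-digit early returns and
-- final length test by plain digit extraction followed by one sort-and-compare against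
-- [1..9] (objective: simpler).

-- ===== PORT A =====
-- inner 'while number > 0' loop of A; none = the early 'return False'
def pvLoopA (number : Int) (digits : List Int) : Option (List Int) :=
  if 0 < number then
    let digit := PySem.Int.mod number 10
    if digit ∈ digits ∨ digit = 0 then none
    else pvLoopA (PySem.Int.floordiv number 10) (digits ++ [digit])
  else some digits
termination_by number.toNat
decreasing_by
  rename_i hpos
  have h10 : (0:Int) < 10 := by omega
  rw [PySem.Int.floordiv_eq_ediv_of_pos h10]
  omega

def nine_pandigital (multiplicand : Int) (multiplier : Int) (product : Int) : Bool :=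
  match pvLoopA multiplicand [] with
  | none => false
  | some d1 =>
    match pvLoopA multiplier d1 with
    | none => false
    | some d2 =>
      match pvLoopA product d2 with
      | none => false
      | some d3 => d3.length == 9

-- ===== PORT B =====
-- B helper '_digits': all base-10 digits of n, least significant first (empty for n ≤ 0)
def pvDigitsB (n : Int) : List Int :=
  if 0 < n then PySem.Int.mod n 10 :: pvDigitsB (PySem.Int.floordiv n 10)
  else []
termination_by n.toNat
decreasing_by
  rename_i hpos
  have h10 : (0:Int) < 10 := by omega
  rw [PySem.Int.floordiv_eq_ediv_of_pos h10]
  omega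

def nine_pandigital_alt (multiplicand : Int) (multiplier : Int) (product : Int) : Bool :=
  PySem.List.sorted (pvDigitsB multiplicand ++ pvDigitsB multiplier ++ pvDigitsB product)
    (fun x => x) false == [1, 2, 3, 4, 5, 6, 7, 8, 9]

-- ===== PRECONDITION & SPEC =====
def Spec_nine_pandigital (multiplicand : Int) (multiplier : Int) (product : Int) (out : Bool) : Prop := out = nine_pandigital_alt multiplicand multiplier product
instance (multiplicand : Int) (multiplier : Int) (product : Int) (out : Bool) : Decidable (Spec_nine_pandigital multiplicand multiplier product out) := by unfold Spec_nine_pandigital; infer_instance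

-- ===== CLAIM (what is proved, stated in full; the proofs are below) =====
def Claim_equal_nine_pandigital : Prop := ∀ (multiplicand : Int) (multiplier : Int) (product : Int), Dom_nine_pandigital multiplicand multiplier product → Spec_nine_pandigital multiplicand multiplier product (nine_pandigital multiplicand multiplier product)

-- ===== LEMMAS AND PROOFS =====

theorem pvLoopA_pos {n : Int} {acc : List Int} (h : 0 < n) :
    pvLoopA n acc =
      if PySem.Int.mod n 10 ∈ acc ∨ PySem.Int.mod n 10 = 0 then none
      else pvLoopA (PySem.Int.floordiv n 10) (acc ++ [PySem.Int.mod n 10]) := by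
  conv_lhs => rw [pvLoopA]
  rw [if_pos h]

theorem pvLoopA_nonpos {n : Int} {acc : List Int} (h : ¬ 0 < n) : pvLoopA n acc = some acc := by
  rw [pvLoopA, if_neg h]

-- every extracted digit is in [0, 10)
theorem pvDigitsB_bounds (n : Int) : ∀ x ∈ pvDigitsB n, 0 ≤ x ∧ x < 10 := by
  fun_induction pvDigitsB n with
  | case1 n h ih =>
    intro x hx
    rcases List.mem_cons.mp hx with rfl | hx
    · exact ⟨PySem.Int.mod_nonneg _ (by omega), PySem.Int.mod_lt _ (by omega)⟩
    · exact ih x hx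
  | case2 n h => simp

-- A's inner loop is: check-free extraction plus the nodup/no-zero test
theorem pvLoopA_spec (n : Int) : ∀ acc : List Int, acc.Nodup →
    pvLoopA n acc =
      if (acc ++ pvDigitsB n).Nodup ∧ (0:Int) ∉ pvDigitsB n then some (acc ++ pvDigitsB n)
      else none := by
  fun_induction pvDigitsB n with
  | case1 n h ih =>
    intro acc hacc
    rw [pvLoopA_pos h]
    generalize hd : PySem.Int.mod n 10 = d at ih ⊢
    generalize hrest : pvDigitsB (PySem.Int.floordiv n 10) = rest at ih ⊢
    by_cases hcase : d ∈ acc ∨ d = 0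
    · rw [if_pos hcase, if_neg]
      rintro ⟨hnd, h0⟩
      rcases hcase with hmem | rfl
      · have hdisj := List.disjoint_of_nodup_append hnd
        exact (List.disjoint_left.mp hdisj hmem) List.mem_cons_self
      · exact h0 (List.mem_cons_self)
    · obtain ⟨hmem, h0⟩ := not_or.mp hcase
      rw [if_neg hcase]
      have hacc' : (acc ++ [d]).Nodup := by
        simp [List.nodup_append, hacc]
        intro a ha rfl; exact hmem ha
      rw [ih (acc ++ [d]) hacc', List.append_assoc]
      simp only [List.singleton_append]
      refine if_congr ?_ rfl rfl
      constructor
      · rintro ⟨a, b⟩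
        refine ⟨a, ?_⟩
        intro hb
        rcases List.mem_cons.mp hb with e | e
        · exact h0 e.symm
        · exact b e
      · rintro ⟨a, b⟩
        exact ⟨a, fun hb => b (List.mem_cons_of_mem _ hb)⟩
  | case2 n h =>
    intro acc hacc
    rw [pvLoopA_nonpos h]
    simp [hacc]

-- A is true iff the combined digit list is duplicate-free, zero-free and of length 9
theorem pvA_iff (m mu p : Int) :
    nine_pandigital m mu p = true ↔
      ((pvDigitsB m ++ pvDigitsB mu ++ pvDigitsB p).Nodup ∧
       (0:Int) ∉ (pvDigitsB m ++ pvDigitsB mu ++ pvDigitsB p) ∧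
       (pvDigitsB m ++ pvDigitsB mu ++ pvDigitsB p).length = 9) := by
  unfold nine_pandigital
  rw [pvLoopA_spec m [] List.nodup_nil]
  simp only [List.nil_append]
  by_cases c1 : (pvDigitsB m).Nodup ∧ (0:Int) ∉ pvDigitsB m
  · rw [if_pos c1]
    simp only []
    rw [pvLoopA_spec mu _ c1.1]
    by_cases c2 : (pvDigitsB m ++ pvDigitsB mu).Nodup ∧ (0:Int) ∉ pvDigitsB mu
    · rw [if_pos c2]
      simp only []
      rw [pvLoopA_spec p _ c2.1]
      by_cases c3 : (pvDigitsB m ++ pvDigitsB mu ++ pvDigitsB p).Nodup ∧ (0:Int) ∉ pvDigitsB p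
      · rw [if_pos c3]
        simp only [beq_iff_eq]
        constructor
        · intro hlen
          refine ⟨c3.1, ?_, hlen⟩
          simp only [List.mem_append, not_or]
          exact ⟨⟨c1.2, c2.2⟩, c3.2⟩
        · rintro ⟨_, _, hlen⟩; exact hlen
      · rw [if_neg c3]
        simp only [Bool.false_eq_true, false_iff]
        rintro ⟨hnd, h0, -⟩
        exact c3 ⟨hnd, fun hx => h0 (by simp [List.mem_append, hx])⟩
    · rw [if_neg c2]
      simp only [Bool.false_eq_true, false_iff]
      rintro ⟨hnd, h0, -⟩
      refine c2 ⟨hnd.sublist (List.sublist_append_left _ _), fun hx => h0 ?_⟩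
      simp [List.mem_append, hx]
  · rw [if_neg c1]
    simp only [Bool.false_eq_true, false_iff]
    rintro ⟨hnd, h0, -⟩
    refine c1 ⟨(hnd.sublist (List.sublist_append_left _ _)).sublist (List.sublist_append_left _ _), fun hx => h0 ?_⟩
    simp [List.mem_append, hx]

-- the sort-and-compare test has the same characterisation
theorem pvB_iff (m mu p : Int) :
    nine_pandigital_alt m mu p = true ↔
      ((pvDigitsB m ++ pvDigitsB mu ++ pvDigitsB p).Nodup ∧
       (0:Int) ∉ (pvDigitsB m ++ pvDigitsB mu ++ pvDigitsB p) ∧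
       (pvDigitsB m ++ pvDigitsB mu ++ pvDigitsB p).length = 9) := by
  unfold nine_pandigital_alt
  rw [beq_iff_eq]
  set L := pvDigitsB m ++ pvDigitsB mu ++ pvDigitsB p with hL
  have hb : ∀ x ∈ L, 0 ≤ x ∧ x < 10 := by
    intro x hx
    rw [hL] at hx
    simp only [List.mem_append] at hx
    rcases hx with (hx | hx) | hx
    · exact pvDigitsB_bounds m x hx
    · exact pvDigitsB_bounds mu x hx
    · exact pvDigitsB_bounds p x hx
  constructor
  · intro hs
    have hperm : ([1,2,3,4,5,6,7,8,9] : List Int).Perm L := hs ▸ PySem.List.sorted_perm L (fun x => x) false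
    refine ⟨hperm.nodup (by decide), ?_, (hperm.length_eq).symm⟩
    intro h0
    exact absurd (hperm.mem_iff.mpr h0) (by decide)
  · rintro ⟨hnd, h0, hlen⟩
    have hsub : L ⊆ ([1,2,3,4,5,6,7,8,9] : List Int) := by
      intro x hx
      obtain ⟨hx0, hx10⟩ := hb x hx
      have hxne : x ≠ 0 := fun e => h0 (e ▸ hx)
      simp only [List.mem_cons, List.not_mem_nil, or_false]
      omega
    have hsp : List.Subperm L ([1,2,3,4,5,6,7,8,9] : List Int) := hnd.subperm hsub
    have hperm : L.Perm ([1,2,3,4,5,6,7,8,9] : List Int) :=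
      hsp.perm_of_length_le (by simp [hlen])
    apply PySem.List.sorted_eq_of_perm_of_pairwise_lt
    · exact hperm.symm
    · decide

-- ===== VERDICT (by name: the statement is the Claim_ definition above) =====
theorem nine_pandigital_spec : Claim_equal_nine_pandigital := by
  intro m mu p _
  unfold Spec_nine_pandigital
  have hA := pvA_iff m mu p
  have hB := pvB_iff m mu p
  cases hA' : nine_pandigital m mu p <;> cases hB' : nine_pandigital_alt m mu p <;>
    simp_all
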